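-- pv_equiv track=rewrite | github.com/dongkyunk/Kaggle_RPS | sparring_partner.py | find_all_longest
-- ===== SOURCE A (Python) =====
-- import operator
-- from collections import namedtuple
-- from typing import List
--
-- HistMatchResult = namedtuple("HistMatchResult", "idx length")
--
-- def find_all_longest(seq, max_len=None) -> List[HistMatchResult]:
--     """
--     Find all indices where end of `seq` matches some past.
--     """
--     result = []
--
--     i_search_start = len(seq) - 2
--
--     while i_search_start > 0:
--         i_sub = -1
--         i_search = i_search_start
--         length = 0
--
--         while i_search >= 0 and seq[i_sub] == seq[i_search]:
--             length += 1
--             i_sub -= 1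
--             i_search -= 1
--
--             if max_len is not None and length > max_len:
--                 break
--
--         if length > 0:
--             result.append(HistMatchResult(i_search_start + 1, length))
--
--         i_search_start -= 1
--
--     result = sorted(result, key=operator.attrgetter("length"), reverse=True)
--
--     return result
-- ===== SOURCE B (Python) =====
-- from collections import namedtuple
--
-- HistMatchResult = namedtuple("HistMatchResult", "idx length")
--
-- def find_all_longest(seq, max_len=None):
--     """
--     Z-algorithm on the reversed sequence: z[k] = length of the longest common
--     prefix of rev and rev[k:], which is exactly the suffix-match length at
--     anchor n-1-k.  O(n) to get all lengths instead of the O(n^2) nested scan.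
--     """
--     n = len(seq)
--     rev = seq[::-1]
--     z = [0] * n
--     if n:
--         z[0] = n
--     l = r = 0
--     for k in range(1, n):
--         zk = min(r - k, z[k - l]) if k < r else 0
--         while k + zk < n and rev[zk] == rev[k + zk]:
--             zk += 1
--         z[k] = zk
--         if k + zk > r:
--             l, r = k, k + zk
--     result = []
--     for i in range(n - 2, 0, -1):
--         length = z[n - 1 - i]
--         if max_len is not None and length > max_len + 1:
--             length = max_len + 1
--         if length > 0:
--             result.append(HistMatchResult(i + 1, length))
--     return sorted(result, key=lambda r: r.length, reverse=True)
-- ===== Notes on version B (the rewrite author's own statement) =====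
-- stated objective: faster
-- what changed: A's O(n^2) nested while-loop that re-scans the suffix match at every anchor is replaced by a single O(n) Z-algorithm pass over the reversed sequence, which yields every match length at once; the same stable descending sort by length is then applied.
-- outside the precondition, e.g. on find_all_longest([1, 2, 1, 2], -1): A returns [(2, 1)], B returns []
import Mathlib
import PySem

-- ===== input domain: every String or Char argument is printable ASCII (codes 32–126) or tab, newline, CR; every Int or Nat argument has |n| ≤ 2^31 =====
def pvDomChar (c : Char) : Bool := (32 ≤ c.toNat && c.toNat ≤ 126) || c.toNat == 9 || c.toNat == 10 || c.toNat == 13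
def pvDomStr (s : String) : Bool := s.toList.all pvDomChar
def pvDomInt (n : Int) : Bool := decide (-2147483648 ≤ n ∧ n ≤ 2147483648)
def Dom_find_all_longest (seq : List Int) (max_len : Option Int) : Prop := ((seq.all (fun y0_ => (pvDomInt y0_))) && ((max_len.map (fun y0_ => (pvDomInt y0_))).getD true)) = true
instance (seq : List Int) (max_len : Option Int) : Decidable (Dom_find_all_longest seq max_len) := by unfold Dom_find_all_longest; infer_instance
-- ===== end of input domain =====

-- B replaces A's quadratic nested suffix-comparison scan by the linear Z-algorithm on the
-- reversed sequence (one pass computing every match length), then the same stable sort.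

-- ===== PORT A =====
-- seq[i] ; A only ever indexes in range (inner loop guards i_search >= 0 and i_sub >= -(n-1)), so the .getD 0 default is never used
def pvGetI (xs : List Int) (i : Int) : Int := (PySem.List.pyGet? xs i).getD 0

-- A's inner 'while i_search >= 0 and seq[i_sub] == seq[i_search]' loop; fuel makes the same
-- computation total (the loop runs at most i_search+1 times)
def pvInnerA (seq : List Int) (ml : Option Int) : Nat → Int → Int → Int → Int
  | 0, _, _, length => length
  | fuel+1, i_sub, i_search, length =>
    if 0 ≤ i_search ∧ pvGetI seq i_sub = pvGetI seq i_search then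
      let length' := length + 1
      if ml.any (fun m => decide (m < length')) then length'   -- 'if max_len is not None and length > max_len: break'
      else pvInnerA seq ml fuel (i_sub - 1) (i_search - 1) length'
    else length

-- A's outer 'while i_search_start > 0' loop; fuel = seq.length suffices
def pvOuterA (seq : List Int) (ml : Option Int) : Nat → Int → List (Int × Int) → List (Int × Int)
  | 0, _, acc => acc
  | fuel+1, i, acc =>
    if 0 < i then
      let length := pvInnerA seq ml (i.toNat + 1) (-1) i 0
      pvOuterA seq ml fuel (i - 1) (if 0 < length then acc ++ [(i + 1, length)] else acc)
    else acc

def find_all_longest (seq : List Int) (max_len : Option Int) : List (Int × Int) :=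
  let result := pvOuterA seq max_len seq.length ((seq.length : Int) - 2) []
  PySem.List.sorted result (fun p => p.2) true

-- ===== PORT B =====
-- Source B's cap: 'if max_len is not None and length > max_len + 1: length = max_len + 1'
def pvCapB (ml : Option Int) (len : Int) : Int :=
  match ml with
  | some m => if m + 1 < len then m + 1 else len
  | none => len

-- Source B's 'while k + zk < n and rev[zk] == rev[k + zk]: zk += 1'; indices are in range, .getD 0 never defaults
def pvZExtend (rev : List Int) (n : Int) : Nat → Int → Int → Int
  | 0, _, zk => zk
  | fuel+1, k, zk =>
    if k + zk < n ∧ rev.getD zk.toNat 0 = rev.getD (k + zk).toNat 0 then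
      pvZExtend rev n fuel k (zk + 1)
    else zk

-- one iteration of Source B's 'for k in range(1, n)' over the state (z, l, r)
def pvZStep (rev : List Int) (n : Int) (st : List Int × Int × Int) (k : Int) : List Int × Int × Int :=
  let z := st.1
  let l := st.2.1
  let r := st.2.2
  let zk0 : Int := if k < r then min (r - k) (z.getD (k - l).toNat 0) else 0
  let zk := pvZExtend rev n n.toNat k zk0
  let z' := z.set k.toNat zk
  if r < k + zk then (z', k, k + zk) else (z', l, r)

def pvZArray (rev : List Int) : List Int :=
  let n : Int := (rev.length : Int)
  let z0 : List Int := List.replicate rev.length 0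
  let z0 := if rev.length ≠ 0 then z0.set 0 n else z0   -- 'if n: z[0] = n'
  ((PySem.List.pyRange 1 n 1).foldl (pvZStep rev n) (z0, 0, 0)).1

def find_all_longest_alt (seq : List Int) (max_len : Option Int) : List (Int × Int) :=
  let n : Int := (seq.length : Int)
  let rev := seq.reverse    -- seq[::-1]  (PySem.List.slice?_none_none_neg_one)
  let z := pvZArray rev
  let result := (PySem.List.pyRange (n - 2) 0 (-1)).foldl (fun acc i =>
    let length := z.getD (n - 1 - i).toNat 0
    let length := pvCapB max_len length
    if 0 < length then acc ++ [(i + 1, length)] else acc) []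
  PySem.List.sorted result (fun p => p.2) true

-- ===== PRECONDITION & SPEC =====
-- Pre_ excludes a NEGATIVE max_len, outside the natural domain of a length cap: A still returns
-- there (its break fires only after counting one element, so matches of length 1 survive a cap of -1),
-- while B's plain cap min(length, max_len+1) drops them.
def Pre_find_all_longest (seq : List Int) (max_len : Option Int) : Prop := 0 ≤ max_len.getD 0
instance (seq : List Int) (max_len : Option Int) : Decidable (Pre_find_all_longest seq max_len) := by unfold Pre_find_all_longest; infer_instance
def pvWitness_find_all_longest : List Int × Option Int := ([1, 2, 1, 2, 1], some 1)

def Spec_find_all_longest (seq : List Int) (max_len : Option Int) (out : List (Int × Int)) : Prop := out = find_all_longest_alt seq max_len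
instance (seq : List Int) (max_len : Option Int) (out : List (Int × Int)) : Decidable (Spec_find_all_longest seq max_len out) := by unfold Spec_find_all_longest; infer_instance

-- ===== CLAIM (what is proved, stated in full; the proofs are below) =====
def Claim_equal_find_all_longest : Prop := ∀ (seq : List Int) (max_len : Option Int), Dom_find_all_longest seq max_len → Pre_find_all_longest seq max_len → Spec_find_all_longest seq max_len (find_all_longest seq max_len)

-- ===== LEMMAS AND PROOFS =====

def pvLcp : List Int → List Int → Nat
  | a :: s, b :: t => if a = b then pvLcp s t + 1 else 0
  | _, _ => 0

theorem pvLcp_le_right : ∀ s t : List Int, pvLcp s t ≤ t.length := by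
  intro s
  induction s with
  | nil => intro t; cases t <;> simp [pvLcp]
  | cons a s ih =>
    intro t
    cases t with
    | nil => simp [pvLcp]
    | cons b t =>
      simp only [pvLcp, List.length_cons]
      split
      · have := ih t; omega
      · omega

theorem pvLcp_match : ∀ (s t : List Int) (j : Nat), j < pvLcp s t → s.getD j 0 = t.getD j 0 := by
  intro s
  induction s with
  | nil => intro t j h; cases t <;> simp [pvLcp] at h
  | cons a s ih =>
    intro t j h
    cases t with
    | nil => simp [pvLcp] at h
    | cons b t =>
      simp only [pvLcp] at h
      split at h
      · cases j with
        | zero => simpa using ‹a = b›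
        | succ j => simpa using ih t j (by omega)
      · omega

theorem pvLcp_stop : ∀ (s t : List Int), pvLcp s t < s.length → pvLcp s t < t.length →
    s.getD (pvLcp s t) 0 ≠ t.getD (pvLcp s t) 0 := by
  intro s
  induction s with
  | nil => intro t h1 h2; simp at h1
  | cons a s ih =>
    intro t h1 h2
    cases t with
    | nil => simp at h2
    | cons b t =>
      simp only [pvLcp, List.length_cons] at *
      split at h1 <;> rename_i hab
      · rw [if_pos hab] at h2 ⊢
        simpa using ih t (by omega) (by omega)
      · simpa [if_neg hab] using hab

theorem pvLcp_ge : ∀ (s t : List Int) (v : Nat), v ≤ s.length → v ≤ t.length →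
    (∀ j, j < v → s.getD j 0 = t.getD j 0) → v ≤ pvLcp s t := by
  intro s
  induction s with
  | nil => intro t v h1 _ _; simp at h1; omega
  | cons a s ih =>
    intro t v h1 h2 hm
    cases t with
    | nil => simp at h2; omega
    | cons b t =>
      cases v with
      | zero => omega
      | succ v =>
        have hab : a = b := by simpa using hm 0 (by omega)
        simp only [pvLcp, if_pos hab]
        have := ih t v (by simpa using h1) (by simpa using h2) (fun j hj => by simpa using hm (j+1) (by omega))
        omega

def pvNZ (s : List Int) (k : Nat) : Nat := pvLcp s (s.drop k)

theorem pvGetD_drop (s : List Int) (k j : Nat) : (s.drop k).getD j 0 = s.getD (k + j) 0 := by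
  simp [List.getD_eq_getElem?_getD, List.getElem?_drop]

theorem pvNZ_le (s : List Int) (k : Nat) : pvNZ s k ≤ s.length - k := by
  have := pvLcp_le_right s (s.drop k)
  simpa [List.length_drop] using this

theorem pvNZ_match (s : List Int) (k j : Nat) (h : j < pvNZ s k) :
    s.getD j 0 = s.getD (k + j) 0 := by
  have := pvLcp_match s (s.drop k) j h
  rwa [pvGetD_drop] at this

theorem pvNZ_ge (s : List Int) (k v : Nat) (hv : k + v ≤ s.length)
    (hm : ∀ j, j < v → s.getD j 0 = s.getD (k + j) 0) : v ≤ pvNZ s k := by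
  apply pvLcp_ge
  · omega
  · simp [List.length_drop]; omega
  · intro j hj; rw [pvGetD_drop]; exact hm j hj

theorem pvNZ_cond_iff (s : List Int) (k zk : Nat) (hzk : zk ≤ pvNZ s k) :
    ((k + zk < s.length) ∧ s.getD zk 0 = s.getD (k + zk) 0) ↔ zk < pvNZ s k := by
  constructor
  · rintro ⟨h1, h2⟩
    rcases Nat.lt_or_ge zk (pvNZ s k) with h | h
    · exact h
    · exfalso
      have hz : zk = pvNZ s k := by omega
      have hs : pvLcp s (s.drop k) < s.length := by
        have := pvNZ_le s k; unfold pvNZ at hz; omega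
      have ht : pvLcp s (s.drop k) < (s.drop k).length := by
        simp [List.length_drop]; unfold pvNZ at hz; omega
      have := pvLcp_stop s (s.drop k) hs ht
      rw [pvGetD_drop] at this
      unfold pvNZ at hz
      rw [← hz] at this
      exact this h2
  · intro h
    have hle := pvNZ_le s k
    exact ⟨by omega, pvNZ_match s k zk h⟩


theorem pvZExtend_eq (s : List Int) (k : Nat) :
    ∀ (fuel v : Nat), v ≤ pvNZ s k → pvNZ s k ≤ v + fuel →
      pvZExtend s (s.length : Int) fuel (k : Int) (v : Int) = (pvNZ s k : Int) := by
  intro fuel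
  induction fuel with
  | zero =>
    intro v h1 h2
    have hv : v = pvNZ s k := by omega
    simp [pvZExtend, hv]
  | succ fuel ih =>
    intro v h1 h2
    have hcond := pvNZ_cond_iff s k v h1
    simp only [pvZExtend]
    rcases Nat.lt_or_ge v (pvNZ s k) with hlt | hge
    · rw [if_pos]
      · have : ((v : Int) + 1) = ((v + 1 : Nat) : Int) := by push_cast; ring
        rw [this]
        exact ih (v + 1) (by omega) (by omega)
      · rcases hcond.mpr hlt with ⟨c1, c2⟩
        constructor
        · omega
        · have e1 : ((v : Int)).toNat = v := by omega
          have e2 : ((k : Int) + v).toNat = k + v := by omega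
          rw [e1, e2]; exact c2
    · have hv : v = pvNZ s k := by omega
      rw [if_neg]
      · rw [hv]
      · intro hc
        have : k + v < s.length ∧ s.getD v 0 = s.getD (k + v) 0 := by
          rcases hc with ⟨c1, c2⟩
          constructor
          · omega
          · have e1 : ((v : Int)).toNat = v := by omega
            have e2 : ((k : Int) + v).toNat = k + v := by omega
            rwa [e1, e2] at c2
        exact absurd (hcond.mp this) (by omega)



def pvZInv (s : List Int) (st : List Int × Int × Int) (k : Nat) : Prop :=
  st.1.length = s.length ∧
  (∀ j : Nat, 1 ≤ j → j < k → st.1.getD j 0 = (pvNZ s j : Int)) ∧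
  ∃ l r : Nat, st.2.1 = (l : Int) ∧ st.2.2 = (r : Int) ∧ l ≤ r ∧ r ≤ s.length ∧
    r - l ≤ pvNZ s l ∧ (0 < r → 1 ≤ l ∧ l < k)

theorem pvZStep_inv (s : List Int) (st : List Int × Int × Int) (k : Nat)
    (hk : 1 ≤ k) (hkn : k < s.length) (h : pvZInv s st k) :
    pvZInv s (pvZStep s (s.length : Int) st (k : Int)) (k + 1) := by
  obtain ⟨z, li, ri⟩ := st
  obtain ⟨hlen, hz, l, r, hl, hr, hlr, hrn, hmatch, hpos⟩ := h
  simp only at hlen hz hl hr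
  subst hl hr
  -- the starting value zk0 is at most pvNZ s k
  have hstart : ∃ v0 : Nat,
      (if (k : Int) < (r : Int) then min ((r : Int) - k) (z.getD ((k : Int) - (l : Int)).toNat 0) else 0) = (v0 : Int)
      ∧ v0 ≤ pvNZ s k := by
    by_cases hkr : (k : Int) < (r : Int)
    · rw [if_pos hkr]
      have hkr' : k < r := by exact_mod_cast hkr
      obtain ⟨hl1, hlk⟩ := hpos (by omega)
      have hzl : z.getD (k - l) 0 = (pvNZ s (k - l) : Int) := hz (k - l) (by omega) (by omega)
      have e : ((k : Int) - (l : Int)).toNat = k - l := by omega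
      rw [e, hzl]
      refine ⟨min (r - k) (pvNZ s (k - l)), by push_cast; omega, ?_⟩
      apply pvNZ_ge
      · omega
      · intro j hj
        have e1 : s.getD j 0 = s.getD ((k - l) + j) 0 := pvNZ_match s (k - l) j (by omega)
        have e2 : s.getD ((k - l) + j) 0 = s.getD (l + ((k - l) + j)) 0 :=
          pvNZ_match s l ((k - l) + j) (by omega)
        have e3 : l + ((k - l) + j) = k + j := by omega
        rw [e1, e2, e3]
    · rw [if_neg hkr]
      exact ⟨0, by norm_num, by omega⟩
  obtain ⟨v0, hv0, hv0le⟩ := hstart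
  have hNle := pvNZ_le s k
  have hzkeq : pvZExtend s (s.length : Int) s.length (k : Int) (v0 : Int) = ((pvNZ s k : Nat) : Int) :=
    pvZExtend_eq s k s.length v0 hv0le (by omega)
  have key : pvZStep s (s.length : Int) (z, (l : Int), (r : Int)) (k : Int) =
      if (r : Int) < (k : Int) + (pvNZ s k : Int) then
        (z.set k ((pvNZ s k : Nat) : Int), (k : Int), (k : Int) + (pvNZ s k : Int))
      else (z.set k ((pvNZ s k : Nat) : Int), (l : Int), (r : Int)) := by
    simp only [pvZStep, hv0, Int.toNat_natCast]
    rw [hzkeq]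
  rw [key]
  -- facts about the updated array
  have hsetlen : (z.set k ((pvNZ s k : Nat) : Int)).length = s.length := by
    simp [hlen]
  have hgetk : (z.set k ((pvNZ s k : Nat) : Int)).getD k 0 = (pvNZ s k : Int) := by
    simp [List.getD_eq_getElem?_getD, hlen, hkn]
  have hgetne : ∀ j : Nat, j ≠ k → (z.set k ((pvNZ s k : Nat) : Int)).getD j 0 = z.getD j 0 := by
    intro j hj
    simp [List.getD_eq_getElem?_getD, List.getElem?_set_ne (by omega : k ≠ j)]
  have hzall : ∀ j : Nat, 1 ≤ j → j < k + 1 → (z.set k ((pvNZ s k : Nat) : Int)).getD j 0 = (pvNZ s j : Int) := by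
    intro j h1 h2
    by_cases hjk : j = k
    · rw [hjk, hgetk]
    · rw [hgetne j hjk]; exact hz j h1 (by omega)
  by_cases hcase : (r : Int) < (k : Int) + (pvNZ s k : Int)
  · rw [if_pos hcase]
    exact ⟨hsetlen, hzall, k, k + pvNZ s k, rfl, by push_cast; ring, by omega, by omega, by omega, fun _ => ⟨hk, by omega⟩⟩
  · rw [if_neg hcase]
    exact ⟨hsetlen, hzall, l, r, rfl, rfl, hlr, hrn, hmatch, fun hp => ⟨(hpos hp).1, by have := (hpos hp).2; omega⟩⟩


theorem pvZFold (s : List Int) :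
    ∀ (cnt k : Nat) (st : List Int × Int × Int), 1 ≤ k → k + cnt = s.length →
      pvZInv s st k →
      pvZInv s ((PySem.List.pyRange (k : Int) (s.length : Int) 1).foldl (pvZStep s (s.length : Int)) st) s.length := by
  intro cnt
  induction cnt with
  | zero =>
    intro k st hk hcnt hinv
    rw [PySem.List.pyRange_one_eq_nil (by omega)]
    simpa [← hcnt] using hinv
  | succ cnt ih =>
    intro k st hk hcnt hinv
    rw [PySem.List.pyRange_one_cons (by exact_mod_cast (by omega : (k:Int) < (s.length:Int)))]
    rw [List.foldl_cons]
    have e : (k : Int) + 1 = ((k + 1 : Nat) : Int) := by push_cast; ring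
    rw [e]
    exact ih (k + 1) _ (by omega) (by omega) (pvZStep_inv s st k hk (by omega) hinv)

theorem pvZArray_correct (s : List Int) :
    ∀ j : Nat, 1 ≤ j → j < s.length → (pvZArray s).getD j 0 = (pvNZ s j : Int) := by
  intro j hj1 hj2
  have hlen : 1 ≤ s.length := by omega
  have hinv : pvZInv s ((if s.length ≠ 0 then (List.replicate s.length (0:Int)).set 0 (s.length:Int) else List.replicate s.length 0), (0:Int), (0:Int)) 1 := by
    refine ⟨by split <;> simp, ?_, 0, 0, rfl, rfl, le_refl _, by omega, by omega, by omega⟩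
    intro j h1 h2; omega
  have := pvZFold s (s.length - 1) 1 _ (le_refl _) (by omega) hinv
  unfold pvZArray
  simp only []
  exact this.2.1 j hj1 hj2





theorem pvGetI_neg (xs : List Int) (t : Nat) (ht : t < xs.length) :
    pvGetI xs (-1 - (t : Int)) = xs.reverse.getD t 0 := by
  have e : (-1 - (t : Int)) = -(((t + 1 : Nat) : Int)) := by push_cast; ring
  rw [pvGetI, e, PySem.List.pyGet?_neg_natCast xs (t+1) (by omega) (by omega)]
  rw [List.getD_eq_getElem?_getD, List.getElem?_reverse ht]
  have e2 : xs.length - (t + 1) = xs.length - 1 - t := by omega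
  rw [e2]

theorem pvGetI_pos (xs : List Int) (i t : Nat) (hti : t ≤ i) (hi : i < xs.length) :
    pvGetI xs ((i : Int) - (t : Int)) = xs.reverse.getD ((xs.length - 1 - i) + t) 0 := by
  have e : ((i : Int) - (t : Int)) = (((i - t : Nat)) : Int) := by omega
  rw [pvGetI, e, PySem.List.pyGet?_natCast]
  rw [List.getD_eq_getElem?_getD, List.getElem?_reverse (by omega)]
  have e2 : xs.length - 1 - (xs.length - 1 - i + t) = i - t := by omega
  rw [e2]

theorem pvInnerA_cond (seq : List Int) (i t : Nat) (hi1 : 1 ≤ i) (hi2 : i + 2 ≤ seq.length)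
    (ht : t ≤ pvNZ seq.reverse (seq.length - 1 - i)) :
    (0 ≤ (i : Int) - (t : Int) ∧ pvGetI seq (-1 - (t : Int)) = pvGetI seq ((i : Int) - (t : Int)))
      ↔ t < pvNZ seq.reverse (seq.length - 1 - i) := by
  have hLle : pvNZ seq.reverse (seq.length - 1 - i) ≤ i + 1 := by
    have := pvNZ_le seq.reverse (seq.length - 1 - i)
    simp only [List.length_reverse] at this
    omega
  by_cases hti : t ≤ i
  · rw [pvGetI_neg seq t (by omega), pvGetI_pos seq i t hti (by omega)]
    have hiff := pvNZ_cond_iff seq.reverse (seq.length - 1 - i) t ht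
    simp only [List.length_reverse] at hiff
    rw [← hiff]
    constructor
    · rintro ⟨_, hm⟩; exact ⟨by omega, hm⟩
    · rintro ⟨hb, hm⟩; exact ⟨by omega, hm⟩
  · constructor
    · rintro ⟨hc, _⟩; omega
    · intro hlt; omega

theorem pvInnerA_gen_none (seq : List Int) (i : Nat) (hi1 : 1 ≤ i) (hi2 : i + 2 ≤ seq.length) :
    ∀ (fuel t : Nat),
      t ≤ pvNZ seq.reverse (seq.length - 1 - i) →
      pvNZ seq.reverse (seq.length - 1 - i) ≤ t + fuel →
      pvInnerA seq none fuel (-1 - (t : Int)) ((i : Int) - (t : Int)) (t : Int)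
        = ((pvNZ seq.reverse (seq.length - 1 - i) : Nat) : Int) := by
  set L := pvNZ seq.reverse (seq.length - 1 - i) with hL
  intro fuel
  induction fuel with
  | zero =>
    intro t h1 h3
    have : t = L := by omega
    simp [pvInnerA, this]
  | succ fuel ih =>
    intro t h1 h3
    simp only [pvInnerA]
    rcases Nat.lt_or_ge t L with hlt | hge
    · rw [if_pos ((pvInnerA_cond seq i t hi1 hi2 h1).mpr hlt)]
      rw [if_neg (by simp [Option.any])]
      have ecast : (t : Int) + 1 = ((t + 1 : Nat) : Int) := by push_cast; ring
      have e1 : (-1 - (t : Int)) - 1 = -1 - ((t + 1 : Nat) : Int) := by push_cast; ring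
      have e2 : ((i : Int) - (t : Int)) - 1 = (i : Int) - ((t + 1 : Nat) : Int) := by push_cast; ring
      rw [ecast, e1, e2]
      exact ih (t + 1) (by omega) (by omega)
    · have ht : t = L := by omega
      rw [if_neg (fun hc => by have := (pvInnerA_cond seq i t hi1 hi2 h1).mp hc; omega)]
      rw [ht]

theorem pvInnerA_gen_some (seq : List Int) (m : Int) (hm0 : 0 ≤ m)
    (i : Nat) (hi1 : 1 ≤ i) (hi2 : i + 2 ≤ seq.length) :
    ∀ (fuel t : Nat),
      t ≤ min (pvNZ seq.reverse (seq.length - 1 - i)) (m + 1).toNat →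
      (t : Int) ≤ m →
      min (pvNZ seq.reverse (seq.length - 1 - i)) (m + 1).toNat ≤ t + fuel →
      pvInnerA seq (some m) fuel (-1 - (t : Int)) ((i : Int) - (t : Int)) (t : Int)
        = ((min (pvNZ seq.reverse (seq.length - 1 - i)) (m + 1).toNat : Nat) : Int) := by
  set L := pvNZ seq.reverse (seq.length - 1 - i) with hL
  set R := min L (m + 1).toNat with hR
  have hRleL : R ≤ L := by omega
  intro fuel
  induction fuel with
  | zero =>
    intro t h1 _ h3
    have : t = R := by omega
    simp [pvInnerA, this]
  | succ fuel ih =>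
    intro t h1 h2 h3
    simp only [pvInnerA]
    rcases Nat.lt_or_ge t R with hlt | hge
    · rw [if_pos ((pvInnerA_cond seq i t hi1 hi2 (by omega)).mpr (by omega))]
      have ecast : (t : Int) + 1 = ((t + 1 : Nat) : Int) := by push_cast; ring
      by_cases heq : m < (t : Int) + 1
      · rw [if_pos (by simp [Option.any]; omega)]
        have hRval : R = t + 1 := by
          have hmt : (m : Int) = t := by omega
          have : (m + 1).toNat = t + 1 := by omega
          omega
        rw [ecast, hRval]
      · rw [if_neg (by simp [Option.any]; omega)]
        have e1 : (-1 - (t : Int)) - 1 = -1 - ((t + 1 : Nat) : Int) := by push_cast; ring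
        have e2 : ((i : Int) - (t : Int)) - 1 = (i : Int) - ((t + 1 : Nat) : Int) := by push_cast; ring
        rw [ecast, e1, e2]
        exact ih (t + 1) (by omega) (by omega) (by omega)
    · have ht : t = R := by omega
      rw [if_neg]
      · rw [ht]
      · intro hc
        have hlt := (pvInnerA_cond seq i t hi1 hi2 (by omega)).mp hc
        omega

theorem pvInnerA_eq (seq : List Int) (ml : Option Int) (hml : 0 ≤ ml.getD 0)
    (i : Nat) (hi1 : 1 ≤ i) (hi2 : i + 2 ≤ seq.length) :
    pvInnerA seq ml (i + 1) (-1) (i : Int) 0 =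
      pvCapB ml ((pvNZ seq.reverse (seq.length - 1 - i) : Int)) := by
  have hLle : pvNZ seq.reverse (seq.length - 1 - i) ≤ i + 1 := by
    have := pvNZ_le seq.reverse (seq.length - 1 - i)
    simp only [List.length_reverse] at this
    omega
  have e1 : (-1 : Int) = -1 - ((0 : Nat) : Int) := by norm_num
  have e2 : (i : Int) = (i : Int) - ((0 : Nat) : Int) := by norm_num
  have e3 : (0 : Int) = ((0 : Nat) : Int) := by norm_num
  cases ml with
  | none =>
    rw [e1, e2, e3, pvInnerA_gen_none seq i hi1 hi2 (i + 1) 0 (by omega) (by omega)]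
    simp [pvCapB]
  | some m =>
    have hm0 : (0 : Int) ≤ m := by simpa using hml
    rw [e1, e2, e3, pvInnerA_gen_some seq m hm0 i hi1 hi2 (i + 1) 0 (by omega) (by omega) (by omega)]
    simp only [pvCapB]
    split <;> rename_i hsp
    · have : ((m + 1).toNat : Int) = m + 1 := by omega
      omega
    · omega


theorem pvOuter_eq (seq : List Int) (ml : Option Int) (hml : 0 ≤ ml.getD 0) :
    ∀ (fuel : Nat) (i : Int) (acc : List (Int × Int)), i.toNat ≤ fuel → i ≤ (seq.length : Int) - 2 →
      pvOuterA seq ml fuel i acc =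
        (PySem.List.pyRange i 0 (-1)).foldl (fun acc i =>
          let length := (pvZArray seq.reverse).getD ((seq.length : Int) - 1 - i).toNat 0
          let length := pvCapB ml length
          if 0 < length then acc ++ [(i + 1, length)] else acc) acc := by
  intro fuel
  induction fuel with
  | zero =>
    intro i acc h1 h2
    have hi0 : i ≤ 0 := by omega
    rw [PySem.List.pyRange_neg_one_eq_nil hi0, List.foldl_nil]
    cases h : i.toNat
    · simp [pvOuterA]
    · omega
  | succ fuel ih =>
    intro i acc h1 h2
    by_cases hi : 0 < i
    · rw [PySem.List.pyRange_neg_one_cons hi, List.foldl_cons]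
      simp only [pvOuterA, if_pos hi]
      set iN := i.toNat with hiN
      have hii : (iN : Int) = i := by omega
      have hlenA : pvInnerA seq ml (iN + 1) (-1) i 0 =
          pvCapB ml ((pvNZ seq.reverse (seq.length - 1 - iN) : Int)) := by
        rw [← hii]
        exact pvInnerA_eq seq ml hml iN (by omega) (by omega)
      have hlenB : (pvZArray seq.reverse).getD ((seq.length : Int) - 1 - i).toNat 0 =
          ((pvNZ seq.reverse (seq.length - 1 - iN) : Nat) : Int) := by
        have e : ((seq.length : Int) - 1 - i).toNat = seq.length - 1 - iN := by omega
        rw [e]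
        have := pvZArray_correct seq.reverse (seq.length - 1 - iN) (by omega) (by simp; omega)
        simpa using this
      simp only [hlenA, hlenB]
      exact ih (i - 1) _ (by omega) (by omega)
    · rw [PySem.List.pyRange_neg_one_eq_nil (by omega), List.foldl_nil]
      simp only [pvOuterA, if_neg hi]

-- ===== VERDICT (by name: the statement is the Claim_ definition above) =====
theorem find_all_longest_spec : Claim_equal_find_all_longest := by
  intro seq ml _ hpre
  unfold Spec_find_all_longest find_all_longest find_all_longest_alt
  rw [pvOuter_eq seq ml hpre seq.length ((seq.length : Int) - 2) [] (by omega) (by omega)]
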